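-- pv_equiv track=rewrite | github.com/AndrewJamson24/self_lessons | python/simple_cryptography/vigenere.py | _pad_key
-- ===== SOURCE A (Python) =====
-- def _pad_key(plaintext, key):
--     padded_key = ''
--     i = 0
--     for char in plaintext:
--         if char.isalpha():
--             padded_key += key [ i % len(key) ]
--             i += 1
--         else:
--             padded_key += ' '
--
--
--     return padded_key
-- ===== SOURCE B (Python) =====
-- def _runs(s):
--     # run-length encode s into (is_alpha, run_length) segments
--     if not s:
--         return []
--     a = s[0].isalpha()
--     i = 1
--     while i < len(s) and s[i].isalpha() == a:
--         i += 1
--     return [(a, i)] + _runs(s[i:])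
--
--
-- def _pad_key(plaintext, key):
--     runs = _runs(plaintext)
--     n = sum(l for a, l in runs if a)
--     cyc = key * (n // len(key) + 1) if n else ''
--     out = []
--     k = 0
--     for a, l in runs:
--         if a:
--             out.append(cyc[k:k + l])
--             k += l
--         else:
--             out.append(' ' * l)
--     return ''.join(out)
-- ===== Notes on version B (the rewrite author's own statement) =====
-- stated objective: alternative
-- what changed: B replaces A's per-character loop (which picks key[i % len(key)] for each alpha char) with a run-length decomposition: it recursively splits the plaintext into maximal alpha/non-alpha runs, pre-builds the whole cycled key by string repetition key*(n//len(key)+1), and emits each run at once as a slice of that cycled key or a block of spaces.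
import Mathlib
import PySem

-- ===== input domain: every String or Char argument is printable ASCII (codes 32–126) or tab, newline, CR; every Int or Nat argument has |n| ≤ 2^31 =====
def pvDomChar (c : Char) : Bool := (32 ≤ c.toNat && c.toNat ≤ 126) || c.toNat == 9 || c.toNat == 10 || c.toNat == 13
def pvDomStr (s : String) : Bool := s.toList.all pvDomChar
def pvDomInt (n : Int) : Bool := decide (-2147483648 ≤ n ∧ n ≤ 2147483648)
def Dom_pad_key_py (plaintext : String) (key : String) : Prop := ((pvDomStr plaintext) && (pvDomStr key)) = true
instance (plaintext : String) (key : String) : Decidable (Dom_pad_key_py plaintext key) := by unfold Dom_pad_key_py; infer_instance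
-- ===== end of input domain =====

-- B replaces A's per-character loop with a run-length decomposition of the plaintext:
-- it pre-builds the whole cycled key by repetition and emits each run as one slice
-- of it (alpha run) or one block of spaces (objective: alternative algorithm, same cost).

-- ===== PORT A =====
-- 'for char in plaintext': accumulator (padded_key, i); 'key[i % len(key)]' raises
-- ZeroDivisionError when len(key) = 0 (modelled as the none branch, excluded by Pre_).
def padA (key : List Char) : List Char → List Char → Int → Option (List Char)
  | [], acc, _ => some acc
  | c :: rest, acc, i =>
    if PySem.Chars.isalpha c then
      if key.length = 0 then none   -- i % 0 : ZeroDivisionError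
      else
        match PySem.List.pyGet? key (PySem.Int.mod i key.length) with
        | none => none
        | some ch => padA key rest (acc ++ [ch]) (i + 1)
    else padA key rest (acc ++ [' ']) i

def pad_key_py (plaintext : String) (key : String) : String :=
  String.ofList ((padA key.toList plaintext.toList [] 0).getD [])

-- ===== PORT B =====
-- _runs: 'i = 1; while i < len(s) and s[i].isalpha() == a: i += 1' — sameLenB counts
-- the while-loop steps (chars after the head with the same class a); then recurse on s[i:].
def sameLenB (a : Bool) : List Char → Nat
  | [] => 0
  | c :: r => if PySem.Chars.isalpha c == a then 1 + sameLenB a r else 0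

def pyRunsB : List Char → List (Bool × Int)
  | [] => []
  | c :: rest =>
    let a := PySem.Chars.isalpha c
    (a, ((1 + sameLenB a rest : Nat) : Int)) :: pyRunsB (rest.drop (sameLenB a rest))
  termination_by cs => cs.length
  decreasing_by simp [List.length_drop]

-- n = sum(l for a, l in runs if a)
def sumAlphaB (runs : List (Bool × Int)) : Int :=
  runs.foldl (fun s p => if p.1 then s + p.2 else s) 0

-- 'for a, l in runs': out gains cyc[k:k+l] (and k += l) or ' ' * l
def emitB (cyc : List Char) : List (Bool × Int) → List (List Char) → Int → List (List Char)
  | [], out, _ => out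
  | (a, l) :: rest, out, k =>
    if a then emitB cyc rest (out ++ [PySem.List.slice cyc (some k) (some (k + l))]) (k + l)
    else emitB cyc rest (out ++ [PySem.List.pyRepeat [' '] l]) k

def padBmain (cs key : List Char) : Option (List Char) :=
  -- runs = _runs(plaintext); n = sum(...); cyc = key * (n // len(key) + 1) if n else ''
  if sumAlphaB (pyRunsB cs) ≠ 0 then
    if key.length = 0 then none   -- n // 0 : ZeroDivisionError
    else
      some (emitB (PySem.List.pyRepeat key
        (PySem.Int.floordiv (sumAlphaB (pyRunsB cs)) key.length + 1)) (pyRunsB cs) [] 0).flatten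
  else some (emitB [] (pyRunsB cs) [] 0).flatten

def pad_key_py_alt (plaintext : String) (key : String) : String :=
  String.ofList ((padBmain plaintext.toList key.toList).getD [])

-- ===== PRECONDITION & SPEC =====
-- Pre_ excludes exactly the inputs where A raises ZeroDivisionError: an empty key
-- together with at least one alphabetic character in the plaintext.
def Pre_pad_key_py (plaintext : String) (key : String) : Prop :=
  key ≠ "" ∨ ∀ c ∈ plaintext.toList, PySem.Chars.isalpha c = false
instance (plaintext : String) (key : String) : Decidable (Pre_pad_key_py plaintext key) := by
  unfold Pre_pad_key_py; infer_instance

def pvWitness_pad_key_py : String × String := ("Hi, you!", "key")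

def Spec_pad_key_py (plaintext : String) (key : String) (out : String) : Prop := out = pad_key_py_alt plaintext key
instance (plaintext : String) (key : String) (out : String) : Decidable (Spec_pad_key_py plaintext key out) := by unfold Spec_pad_key_py; infer_instance

-- ===== CLAIM (what is proved, stated in full; the proofs are below) =====
def Claim_equal_pad_key_py : Prop := ∀ (plaintext : String) (key : String), Dom_pad_key_py plaintext key → Pre_pad_key_py plaintext key → Spec_pad_key_py plaintext key (pad_key_py plaintext key)

-- ===== LEMMAS AND PROOFS =====

-- the common value of both programs: the j-th alpha char (0-based) becomes key[j % len key]
def specN (key : List Char) : List Char → Nat → List Char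
  | [], _ => []
  | c :: r, k =>
    if PySem.Chars.isalpha c then key.getD (k % key.length) ' ' :: specN key r (k + 1)
    else ' ' :: specN key r k

def countAlpha (cs : List Char) : Nat := (cs.filter PySem.Chars.isalpha).length

-- ---- A side ----
theorem pyGet?_mod (key : List Char) (hk : key ≠ []) (k : Nat) :
    PySem.List.pyGet? key (PySem.Int.mod (k : Int) key.length) =
      some (key.getD (k % key.length) ' ') := by
  have hlen : 0 < key.length := List.length_pos_iff.mpr hk
  have hlt : k % key.length < key.length := Nat.mod_lt _ hlen
  rw [PySem.Int.mod_natCast, PySem.List.pyGet?_natCast]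
  simp [List.getD, hlt]

theorem padA_spec (key : List Char) (hk : key ≠ []) :
    ∀ (cs : List Char) (acc : List Char) (k : Nat),
      padA key cs acc (k : Int) = some (acc ++ specN key cs k) := by
  intro cs
  induction cs with
  | nil => intro acc k; simp [padA, specN]
  | cons c rest ih =>
    intro acc k
    by_cases hc : PySem.Chars.isalpha c
    · have hne : ¬ key.length = 0 := by simpa [List.length_eq_zero_iff] using hk
      rw [padA]
      simp only [hc, if_true, hne, if_false, pyGet?_mod key hk k]
      have : ((k : Int) + 1) = ((k + 1 : Nat) : Int) := by push_cast; ring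
      rw [this, ih]
      simp [specN, hc]
    · rw [padA]
      simp only [hc, if_false, Bool.false_eq_true]
      rw [ih]
      simp [specN, hc]

theorem padA_no_alpha (key : List Char) :
    ∀ (cs : List Char) (acc : List Char) (i : Int),
      (∀ c ∈ cs, PySem.Chars.isalpha c = false) →
      padA key cs acc i = some (acc ++ List.replicate cs.length ' ') := by
  intro cs
  induction cs with
  | nil => intro acc i _; simp [padA]
  | cons c rest ih =>
    intro acc i h
    have hc : PySem.Chars.isalpha c = false := h c (by simp)
    rw [padA]
    simp only [hc, Bool.false_eq_true, if_false]
    rw [ih _ i (fun d hd => h d (by simp [hd]))]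
    simp [List.replicate_succ]

theorem specN_no_alpha (key : List Char) :
    ∀ (cs : List Char) (k : Nat), (∀ c ∈ cs, PySem.Chars.isalpha c = false) →
      specN key cs k = List.replicate cs.length ' ' := by
  intro cs
  induction cs with
  | nil => intro k _; simp [specN]
  | cons c rest ih =>
    intro k h
    have hc : PySem.Chars.isalpha c = false := h c (by simp)
    simp [specN, hc, ih k (fun d hd => h d (by simp [hd])), List.replicate_succ]

-- ---- B side ----
theorem sameLenB_le (a : Bool) : ∀ r : List Char, sameLenB a r ≤ r.length := by
  intro r
  induction r with
  | nil => simp [sameLenB]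
  | cons d t ih =>
    by_cases hd : PySem.Chars.isalpha d == a
    · rw [sameLenB, if_pos hd]; simp; omega
    · rw [sameLenB, if_neg hd]; simp

theorem sameLenB_take (a : Bool) :
    ∀ rest : List Char, ∀ c ∈ rest.take (sameLenB a rest), PySem.Chars.isalpha c = a := by
  intro rest
  induction rest with
  | nil => intro c hc; simp at hc
  | cons d r ih =>
    intro c hc
    by_cases hd : PySem.Chars.isalpha d = a
    · rw [sameLenB, if_pos (by simp [hd]), Nat.add_comm, List.take_succ_cons] at hc
      rcases List.mem_cons.mp hc with h | h
      · subst h; exact hd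
      · exact ih c h
    · rw [sameLenB, if_neg (by simp [hd])] at hc
      simp at hc

theorem pyRunsB_cons (c : Char) (rest : List Char) :
    pyRunsB (c :: rest) =
      (PySem.Chars.isalpha c,
        ((1 + sameLenB (PySem.Chars.isalpha c) rest : Nat) : Int)) ::
        pyRunsB (rest.drop (sameLenB (PySem.Chars.isalpha c) rest)) := by
  rw [pyRunsB]

theorem emitB_out (cyc : List Char) :
    ∀ (runs : List (Bool × Int)) (out : List (List Char)) (k : Int),
      emitB cyc runs out k = out ++ emitB cyc runs [] k := by
  intro runs
  induction runs with
  | nil => intro out k; simp [emitB]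
  | cons p rest ih =>
    intro out k
    obtain ⟨a, l⟩ := p
    cases a
    · rw [emitB, if_neg (by simp), emitB, if_neg (by simp)]
      simp only [List.nil_append]
      rw [ih, ih [PySem.List.pyRepeat [' '] l]]
      simp
    · rw [emitB, if_pos rfl, emitB, if_pos rfl]
      simp only [List.nil_append]
      rw [ih, ih [PySem.List.slice cyc (some k) (some (k + l))]]
      simp

theorem take_drop_map_range (xs : List Char) (k l : Nat) (h : k + l ≤ xs.length) :
    (xs.drop k).take l = (List.range l).map (fun j => xs.getD (k + j) ' ') := by
  apply List.ext_getElem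
  · simp; omega
  · intro i h1 h2
    have hi : i < l := by simp at h1; omega
    have hki : k + i < xs.length := by omega
    rw [List.getElem_take, List.getElem_drop]
    simp [List.getD, List.getElem?_eq_getElem hki]

theorem specN_block_false (key : List Char) :
    ∀ (b t : List Char) (k : Nat), (∀ c ∈ b, PySem.Chars.isalpha c = false) →
      specN key (b ++ t) k = List.replicate b.length ' ' ++ specN key t k := by
  intro b
  induction b with
  | nil => intro t k _; simp
  | cons c r ih =>
    intro t k h
    have hc : PySem.Chars.isalpha c = false := h c (by simp)
    simp only [List.cons_append, specN, hc, Bool.false_eq_true, if_false]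
    rw [ih t k (fun d hd => h d (by simp [hd]))]
    simp [List.replicate_succ]

theorem specN_block_true (key : List Char) :
    ∀ (b t : List Char) (k : Nat), (∀ c ∈ b, PySem.Chars.isalpha c = true) →
      specN key (b ++ t) k =
        (List.range b.length).map (fun j => key.getD ((k + j) % key.length) ' ')
          ++ specN key t (k + b.length) := by
  intro b
  induction b with
  | nil => intro t k _; simp
  | cons c r ih =>
    intro t k h
    have hc : PySem.Chars.isalpha c = true := h c (by simp)
    simp only [List.cons_append, specN, hc, if_true]
    rw [ih t (k + 1) (fun d hd => h d (by simp [hd]))]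
    rw [List.length_cons, List.range_succ_eq_map, List.map_cons, List.map_map,
      List.cons_append]
    have h2 : List.map ((fun j => key.getD ((k + j) % key.length) ' ') ∘ Nat.succ)
        (List.range r.length)
        = List.map (fun j => key.getD ((k + 1 + j) % key.length) ' ') (List.range r.length) := by
      apply List.map_congr_left
      intro j _
      simp only [Function.comp]
      congr 2
      omega
    have h3 : k + (r.length + 1) = k + 1 + r.length := by omega
    rw [h2, h3]
    simp

theorem countAlpha_append (b t : List Char) :
    countAlpha (b ++ t) = countAlpha b + countAlpha t := by
  simp [countAlpha, List.filter_append]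

theorem countAlpha_true (b : List Char) (h : ∀ c ∈ b, PySem.Chars.isalpha c = true) :
    countAlpha b = b.length := by
  unfold countAlpha
  rw [List.filter_eq_self.mpr h]

theorem countAlpha_false (b : List Char) (h : ∀ c ∈ b, PySem.Chars.isalpha c = false) :
    countAlpha b = 0 := by
  unfold countAlpha
  rw [List.filter_eq_nil_iff.mpr (by intro c hc; simp [h c hc])]
  rfl

theorem flatRep_length (key : List Char) (r : Nat) :
    ((List.replicate r key).flatten).length = r * key.length := by
  induction r with
  | zero => simp
  | succ m ih => simp [List.replicate_succ, ih]; ring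

theorem flatRep_getD (key : List Char) :
    ∀ (r j : Nat), j < r * key.length →
      ((List.replicate r key).flatten).getD j ' ' = key.getD (j % key.length) ' ' := by
  intro r
  induction r with
  | zero => intro j hj; simp at hj
  | succ m ih =>
    intro j hj
    rw [List.replicate_succ, List.flatten_cons]
    by_cases hjl : j < key.length
    · rw [List.getD_append _ _ _ _ hjl, Nat.mod_eq_of_lt hjl]
    · rw [Nat.not_lt] at hjl
      rw [List.getD_eq_getElem?_getD, List.getElem?_append_right hjl,
        ← List.getD_eq_getElem?_getD]
      rw [ih (j - key.length) (by
        have hsm : (m + 1) * key.length = m * key.length + key.length := by ring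
        omega)]
      rw [Nat.mod_eq_sub_mod hjl]

theorem sumAlphaB_foldl (runs : List (Bool × Int)) :
    ∀ s : Int, runs.foldl (fun s p => if p.1 then s + p.2 else s) s = s + sumAlphaB runs := by
  induction runs with
  | nil => intro s; simp [sumAlphaB]
  | cons p rest ih =>
    intro s
    obtain ⟨a, l⟩ := p
    simp only [sumAlphaB, List.foldl_cons]
    cases a
    · simp only [show ((false, l).1 = true) = False from by simp, if_false]
      exact ih s
    · simp only [if_true]
      rw [ih (s + l), ih (0 + l)]
      ring

theorem sumAlphaB_runs :
    ∀ (fuel : Nat) (cs : List Char), cs.length ≤ fuel →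
      sumAlphaB (pyRunsB cs) = (countAlpha cs : Int) := by
  intro fuel
  induction fuel with
  | zero =>
    intro cs h
    have : cs = [] := List.length_eq_zero_iff.mp (by omega)
    subst this; simp [pyRunsB, sumAlphaB, countAlpha]
  | succ m ih =>
    intro cs h
    match cs with
    | [] => simp [pyRunsB, sumAlphaB, countAlpha]
    | c :: rest =>
      rw [pyRunsB_cons]
      set a := PySem.Chars.isalpha c with ha
      set msl := sameLenB a rest with hmsl
      have hdecomp : c :: rest = (c :: rest.take msl) ++ rest.drop msl := by
        simp [List.take_append_drop]
      have hblock : ∀ d ∈ c :: rest.take msl, PySem.Chars.isalpha d = a := by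
        intro d hd
        rcases List.mem_cons.mp hd with h1 | h1
        · subst h1; rfl
        · exact sameLenB_take a rest d h1
      have htail : (rest.drop msl).length ≤ m := by
        simp only [List.length_cons] at h
        rw [List.length_drop]
        omega
      have hstep : sumAlphaB ((a, ((1 + msl : Nat) : Int)) :: pyRunsB (rest.drop msl)) =
          (if a = true then ((1 + msl : Nat) : Int) else 0) + sumAlphaB (pyRunsB (rest.drop msl)) := by
        unfold sumAlphaB
        rw [List.foldl_cons, sumAlphaB_foldl]
        by_cases ha' : a = true
        · rw [if_pos (show ((a, ((1 + msl : Nat) : Int)) : Bool × Int).1 = true from ha'),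
            if_pos ha']
          simp [sumAlphaB]
        · rw [if_neg (show ¬ ((a, ((1 + msl : Nat) : Int)) : Bool × Int).1 = true from ha'),
            if_neg ha']
          simp [sumAlphaB]
      rw [hstep, ih _ htail]
      conv_rhs => rw [hdecomp]
      rw [countAlpha_append]
      have hblen : (c :: rest.take msl).length = 1 + msl := by
        have := sameLenB_le a rest
        simp [List.length_take]
        omega
      by_cases ha' : a = true
      · rw [countAlpha_true (c :: rest.take msl) (by intro d hd; rw [hblock d hd]; exact ha'), hblen, if_pos ha']
        push_cast; ring
      · rw [countAlpha_false (c :: rest.take msl) (by intro d hd; rw [hblock d hd]; simpa using ha'), if_neg ha']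
        push_cast; ring

theorem emit_spec (key cyc : List Char)
    (Hcyc : ∀ j : Nat, j < cyc.length → cyc.getD j ' ' = key.getD (j % key.length) ' ') :
    ∀ (fuel : Nat) (cs : List Char), cs.length ≤ fuel → ∀ k : Nat,
      k + countAlpha cs ≤ cyc.length →
      (emitB cyc (pyRunsB cs) [] ((k : Nat) : Int)).flatten = specN key cs k := by
  intro fuel
  induction fuel with
  | zero =>
    intro cs h
    have : cs = [] := List.length_eq_zero_iff.mp (by omega)
    subst this; intro k _; simp [pyRunsB, emitB, specN]
  | succ m ih =>
    intro cs h k hk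
    match cs with
    | [] => simp [pyRunsB, emitB, specN]
    | c :: rest =>
      rw [pyRunsB_cons]
      set a := PySem.Chars.isalpha c with ha
      set msl := sameLenB a rest with hmsl
      have hdecomp : c :: rest = (c :: rest.take msl) ++ rest.drop msl := by
        simp [List.take_append_drop]
      have hblock : ∀ d ∈ c :: rest.take msl, PySem.Chars.isalpha d = a := by
        intro d hd
        rcases List.mem_cons.mp hd with h1 | h1
        · subst h1; rfl
        · exact sameLenB_take a rest d h1
      have hblen : (c :: rest.take msl).length = 1 + msl := by
        have := sameLenB_le a rest
        simp [List.length_take]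
        omega
      have htail : (rest.drop msl).length ≤ m := by
        simp only [List.length_cons] at h
        rw [List.length_drop]
        omega
      have hcount : countAlpha (c :: rest) =
          (if a = true then 1 + msl else 0) + countAlpha (rest.drop msl) := by
        conv_lhs => rw [hdecomp]
        rw [countAlpha_append]
        by_cases ha' : a = true
        · rw [countAlpha_true (c :: rest.take msl) (by intro d hd; rw [hblock d hd]; exact ha'), hblen, if_pos ha']
        · rw [countAlpha_false (c :: rest.take msl) (by intro d hd; rw [hblock d hd]; simpa using ha'), if_neg ha']
      by_cases ha' : a = true
      · -- alpha run: one slice of cyc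
        rw [emitB, if_pos ha', emitB_out]
        have hcast : ((k : Nat) : Int) + ((1 + msl : Nat) : Int) = (((k + (1 + msl) : Nat)) : Int) := by
          push_cast; ring
        rw [List.nil_append, hcast]
        rw [List.flatten_append, List.flatten_cons, List.flatten_nil, List.append_nil]
        have hbound : k + (1 + msl) ≤ cyc.length := by
          rw [hcount, if_pos ha'] at hk; omega
        rw [ih _ htail (k + (1 + msl)) (by rw [hcount, if_pos ha'] at hk; omega)]
        rw [PySem.List.slice_natCast]
        rw [show k + (1 + msl) - k = 1 + msl by omega]
        rw [take_drop_map_range cyc k (1 + msl) hbound]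
        conv_rhs => rw [hdecomp]
        rw [specN_block_true key _ _ k (by intro d hd; rw [hblock d hd]; exact ha'), hblen]
        congr 1
        apply List.map_congr_left
        intro j hj
        have hjl : j < 1 + msl := List.mem_range.mp hj
        exact Hcyc (k + j) (by omega)
      · -- non-alpha run: a block of spaces, k unchanged
        rw [emitB, if_neg ha', emitB_out]
        rw [List.nil_append]
        rw [List.flatten_append, List.flatten_cons, List.flatten_nil, List.append_nil]
        rw [ih _ htail k (by rw [hcount, if_neg ha'] at hk; omega)]
        conv_rhs => rw [hdecomp]
        rw [specN_block_false key _ _ k (by intro d hd; rw [hblock d hd]; simpa using ha'), hblen]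
        congr 1
        unfold PySem.List.pyRepeat
        rw [show (((1 + msl : Nat) : Int)).toNat = 1 + msl by omega]
        generalize 1 + msl = n
        induction n with
        | zero => simp
        | succ p ihp => simp [List.replicate_succ, ihp]

-- ===== VERDICT (by name: the statement is the Claim_ definition above) =====
theorem pad_key_py_spec : Claim_equal_pad_key_py := by
  intro plaintext key _hdom hpre
  unfold Spec_pad_key_py pad_key_py pad_key_py_alt padBmain
  set cs := plaintext.toList with hcs
  set kl := key.toList with hkl
  have hsum := sumAlphaB_runs cs.length cs (le_refl _)
  by_cases hk : kl = []
  · -- empty key: Pre_ forces a plaintext with no alphabetic characters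
    have hna : ∀ c ∈ cs, PySem.Chars.isalpha c = false := by
      rcases hpre with hkey | hna
      · exact absurd (String.toList_eq_nil_iff.mp (hkl ▸ hk)) hkey
      · exact hna
    have hca : countAlpha cs = 0 := countAlpha_false cs hna
    rw [hsum, hca]
    simp only [Nat.cast_zero, ne_eq, not_true_eq_false, if_false]
    rw [padA_no_alpha kl cs [] 0 hna]
    have hb := emit_spec kl [] (by intro j hj; simp at hj) cs.length cs (le_refl _) 0
      (by simp [hca])
    simp only [Nat.cast_zero] at hb
    rw [hb, specN_no_alpha kl cs 0 hna]
    simp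
  · -- nonempty key
    have hA := padA_spec kl hk cs [] 0
    simp only [Nat.cast_zero, List.nil_append] at hA
    rw [hA, hsum]
    by_cases hca : countAlpha cs = 0
    · rw [hca]
      simp only [Nat.cast_zero, ne_eq, not_true_eq_false, if_false]
      have hb := emit_spec kl [] (by intro j hj; simp at hj) cs.length cs (le_refl _) 0
        (by simp [hca])
      simp only [Nat.cast_zero] at hb
      rw [hb]
    · have hlen : 0 < kl.length := List.length_pos_iff.mpr hk
      rw [if_pos (by exact_mod_cast hca), if_neg (by omega)]
      rw [show PySem.Int.floordiv ((countAlpha cs : Nat) : Int) ((kl.length : Nat) : Int) + 1 =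
            (((countAlpha cs / kl.length + 1 : Nat)) : Int) by
        rw [PySem.Int.floordiv_natCast]; push_cast; ring]
      set r := countAlpha cs / kl.length + 1 with hr
      have hcycdef : PySem.List.pyRepeat kl ((r : Nat) : Int) = (List.replicate r kl).flatten := by
        unfold PySem.List.pyRepeat
        simp
      rw [hcycdef]
      have hclen : ((List.replicate r kl).flatten).length = r * kl.length := flatRep_length kl r
      have hcalt : countAlpha cs < r * kl.length := by
        have h1 := Nat.div_add_mod (countAlpha cs) kl.length
        have h2 : countAlpha cs % kl.length < kl.length := Nat.mod_lt _ hlen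
        have h3 : countAlpha cs / kl.length * kl.length = kl.length * (countAlpha cs / kl.length) :=
          Nat.mul_comm _ _
        rw [hr, Nat.add_mul, Nat.one_mul]
        omega
      have hb := emit_spec kl ((List.replicate r kl).flatten)
        (by intro j hj; exact flatRep_getD kl r j (by omega)) cs.length cs (le_refl _) 0
        (by omega)
      simp only [Nat.cast_zero] at hb
      rw [hb]
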